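-- pv_equiv track=rewrite | github.com/shivammehta25/Fun-Coding | AdventOfCode2024/Day5/solution.py | fix_it
-- ===== SOURCE A (Python) =====
-- def fix_it(prev_rules, pg_num):
--     n = len(pg_num)
--     ans = [0] * n
--     for i in range(n):
--         current_element = pg_num[i]
--         counter = 0
--         if current_element not in prev_rules:
--             ans[counter] = current_element
--             continue
--
--         for j in range(n):
--             if i == j:
--                 continue
--             checking_element = pg_num[j]
--             if checking_element in prev_rules[current_element]:
--                 counter += 1
--         ans[counter] = current_element
--
--     return ans
-- ===== SOURCE B (Python) =====
-- def fix_it(prev_rules, pg_num):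
--     counts = {}
--     for v in pg_num:
--         counts[v] = counts.get(v, 0) + 1
--     ans = [0] * len(pg_num)
--     for v in pg_num:
--         if v in prev_rules:
--             rule_set = set(prev_rules[v])
--             c = sum(counts.get(r, 0) for r in rule_set) - (1 if v in rule_set else 0)
--         else:
--             c = 0
--         ans[c] = v
--     return ans
-- ===== Notes on version B (the rewrite author's own statement) =====
-- stated objective: faster
-- what changed: Replaces the O(n^2) inner scan over all other pages with a precomputed occurrence counter: each page's rank is the sum of the counts of its rule-set members minus its own membership, computed in one pass over the (deduplicated) rule set.
import Mathlib
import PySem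

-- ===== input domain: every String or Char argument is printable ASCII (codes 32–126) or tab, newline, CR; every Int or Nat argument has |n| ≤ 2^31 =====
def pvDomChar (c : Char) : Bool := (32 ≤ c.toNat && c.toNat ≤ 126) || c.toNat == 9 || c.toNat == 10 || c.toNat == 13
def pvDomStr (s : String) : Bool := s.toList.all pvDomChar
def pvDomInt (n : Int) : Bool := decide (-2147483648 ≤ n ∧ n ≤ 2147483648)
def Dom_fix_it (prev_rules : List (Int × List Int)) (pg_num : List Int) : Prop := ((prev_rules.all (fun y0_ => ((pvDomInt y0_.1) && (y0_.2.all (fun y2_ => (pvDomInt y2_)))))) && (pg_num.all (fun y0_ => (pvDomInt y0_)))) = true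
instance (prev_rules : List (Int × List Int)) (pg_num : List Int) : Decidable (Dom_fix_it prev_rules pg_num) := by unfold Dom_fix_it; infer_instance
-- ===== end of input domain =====

-- B replaces A's quadratic per-page scan of all other pages by a one-pass occurrence
-- counter of pg_num, ranking each page by the summed counts of its rule set (minus
-- self-membership); objective: faster.

-- ===== PORT A =====
def fix_it (prev_rules : List (Int × List Int)) (pg_num : List Int) : List Int :=
  let n : Int := PySem.List.len pg_num
  (PySem.List.pyRange 0 n 1).foldl (fun ans i =>
    let current := PySem.List.pyGetD pg_num i 0
    match (PySem.Dict.mk prev_rules).get? current with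
    | none => PySem.List.pySetD ans 0 current
    | some rules =>
        let counter : Int :=
          (PySem.List.pyRange 0 n 1).foldl (fun c j =>
            if i = j then c
            else if PySem.List.pyGetD pg_num j 0 ∈ rules then c + 1 else c) 0
        PySem.List.pySetD ans counter current)
    (List.replicate pg_num.length 0)

-- ===== PORT B =====
def fix_it_alt (prev_rules : List (Int × List Int)) (pg_num : List Int) : List Int :=
  let counts : PySem.Dict Int Int :=
    pg_num.foldl (fun d v => d.insert v (d.getD v 0 + 1)) PySem.Dict.empty
  pg_num.foldl (fun ans v =>
    let c : Int :=
      match (PySem.Dict.mk prev_rules).get? v with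
      | none => 0
      | some rules =>
          let rs : PySem.Set Int := PySem.Set.ofList rules
          rs.foldl (fun s r => s + counts.getD r 0) 0
            - (if PySem.Set.contains rs v then 1 else 0)
    PySem.List.pySetD ans c v)
    (List.replicate pg_num.length 0)

-- ===== PRECONDITION & SPEC =====
def Spec_fix_it (prev_rules : List (Int × List Int)) (pg_num : List Int) (out : List Int) : Prop := out = fix_it_alt prev_rules pg_num
instance (prev_rules : List (Int × List Int)) (pg_num : List Int) (out : List Int) : Decidable (Spec_fix_it prev_rules pg_num out) := by unfold Spec_fix_it; infer_instance

-- ===== CLAIM (what is proved, stated in full; the proofs are below) =====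
def Claim_equal_fix_it : Prop := ∀ (prev_rules : List (Int × List Int)) (pg_num : List Int), Dom_fix_it prev_rules pg_num → Spec_fix_it prev_rules pg_num (fix_it prev_rules pg_num)

-- ===== LEMMAS AND PROOFS =====

-- the common "rank" of a page value v: count of pages lying in v's rule list, minus self-membership
def pvRank (prev_rules : List (Int × List Int)) (pg_num : List Int) (v : Int) : Int :=
  match (PySem.Dict.mk prev_rules).get? v with
  | none => 0
  | some rules =>
      (pg_num.countP (fun x => decide (x ∈ rules)) : Int) - (if v ∈ rules then 1 else 0)

-- Python count over range(n) equals countP over the list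
theorem pvCountAll (pg_num : List Int) (rules : List Int) :
    (PySem.List.pyRange 0 (PySem.List.len pg_num) 1).foldl (fun c j =>
        if PySem.List.pyGetD pg_num j 0 ∈ rules then c + 1 else c) 0
    = (pg_num.countP (fun x => decide (x ∈ rules)) : Int) := by
  have h := PySem.List.foldl_pyRange_zero_pyGetD' pg_num 0
    (fun (c : Int) (x : Int) => if x ∈ rules then c + 1 else c) 0
  simp only [PySem.List.len_eq] at h ⊢
  rw [h, PySem.List.foldl_ite_add_one (fun x => x ∈ rules)]
  simp

-- A's inner loop equals the rank of pg_num[i]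
theorem pvInnerA (pg_num : List Int) (rules : List Int) (i : Int)
    (h0 : 0 ≤ i) (hn : i < PySem.List.len pg_num) :
    (PySem.List.pyRange 0 (PySem.List.len pg_num) 1).foldl (fun c j =>
        if i = j then c
        else if PySem.List.pyGetD pg_num j 0 ∈ rules then c + 1 else c) 0
    = (pg_num.countP (fun x => decide (x ∈ rules)) : Int)
      - (if PySem.List.pyGetD pg_num i 0 ∈ rules then 1 else 0) := by
  have hsplit : PySem.List.pyRange 0 (PySem.List.len pg_num) 1
      = PySem.List.pyRange 0 i 1 ++ i :: PySem.List.pyRange (i + 1) (PySem.List.len pg_num) 1 := by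
    rw [PySem.List.pyRange_one_append 0 i (PySem.List.len pg_num) h0 (le_of_lt hn),
        PySem.List.pyRange_one_cons hn]
  rw [← pvCountAll pg_num rules, hsplit]
  simp only [List.foldl_append, List.foldl_cons]
  rw [if_pos trivial]
  have hpre : ∀ (a : Int), (PySem.List.pyRange 0 i 1).foldl (fun c j =>
      if i = j then c
      else if PySem.List.pyGetD pg_num j 0 ∈ rules then c + 1 else c) a
      = (PySem.List.pyRange 0 i 1).foldl (fun c j =>
      if PySem.List.pyGetD pg_num j 0 ∈ rules then c + 1 else c) a := by
    intro a
    apply PySem.List.foldl_congr_mem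
    intro acc x hx
    have := PySem.List.mem_pyRange_one.mp hx
    have hne : i ≠ x := by omega
    simp [if_neg hne]
  have hsuf : ∀ (a : Int), (PySem.List.pyRange (i + 1) (PySem.List.len pg_num) 1).foldl (fun c j =>
      if i = j then c
      else if PySem.List.pyGetD pg_num j 0 ∈ rules then c + 1 else c) a
      = (PySem.List.pyRange (i + 1) (PySem.List.len pg_num) 1).foldl (fun c j =>
      if PySem.List.pyGetD pg_num j 0 ∈ rules then c + 1 else c) a := by
    intro a
    apply PySem.List.foldl_congr_mem
    intro acc x hx
    have := PySem.List.mem_pyRange_one.mp hx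
    have hne : i ≠ x := by omega
    simp [if_neg hne]
  rw [hpre, hsuf]
  rw [PySem.List.foldl_ite_add_one (fun j => PySem.List.pyGetD pg_num j 0 ∈ rules),
      PySem.List.foldl_ite_add_one (fun j => PySem.List.pyGetD pg_num j 0 ∈ rules),
      PySem.List.foldl_ite_add_one (fun j => PySem.List.pyGetD pg_num j 0 ∈ rules)]
  by_cases h : PySem.List.pyGetD pg_num i 0 ∈ rules
  · simp only [if_pos h]; omega
  · simp only [if_neg h]; omega

-- sum of occurrence counts over a nodup set equals countP of membership
theorem pvSumCounts (S : List Int) (hS : S.Nodup) (l : List Int) :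
    (S.map (fun r => (l.count r : Int))).sum = (l.countP (fun x => decide (x ∈ S)) : Int) := by
  induction l with
  | nil => simp
  | cons x t ih =>
    have hcnt : ∀ r : Int, ((x :: t).count r : Int) = (t.count r : Int) + (if x = r then 1 else 0) := by
      intro r
      by_cases h : x = r
      · subst h; simp
      · simp [h]
    have hmap : (S.map (fun r => ((x :: t).count r : Int))).sum
        = (S.map (fun r => (t.count r : Int))).sum + (S.map (fun r => if x = r then (1 : Int) else 0)).sum := by
      calc (S.map (fun r => ((x :: t).count r : Int))).sum
          = (S.map (fun r => (t.count r : Int) + (if x = r then 1 else 0))).sum := by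
            congr 1; exact List.map_congr_left (fun r _ => hcnt r)
        _ = _ := by
            induction S with
            | nil => simp
            | cons s S' ihS => simp [List.map_cons, List.sum_cons]; ring
    have hind : (S.map (fun r => if x = r then (1 : Int) else 0)).sum = if x ∈ S then 1 else 0 := by
      have h1 : (S.map (fun r => if x = r then (1 : Int) else 0)).sum
          = (S.map (fun r => if (x == r) = true then (1 : Int) else 0)).sum := by
        congr 1; exact List.map_congr_left (fun r _ => by by_cases h : x = r <;> simp [h])
      rw [h1, PySem.List.sum_map_ite_one_zero (fun r => x == r) S]
      have h2 : S.countP (fun r => x == r) = S.count x := by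
        simp [List.count]
        exact List.countP_congr (fun r _ => by by_cases h : x = r <;> simp [h, Ne.symm])
      rw [h2]
      by_cases hx : x ∈ S
      · rw [List.count_eq_one_of_mem hS hx]; simp [hx]
      · rw [List.count_eq_zero_of_not_mem hx]; simp [hx]
    rw [hmap, ih, hind, List.countP_cons]
    by_cases hx : x ∈ S <;> simp [hx]

-- ===== VERDICT (by name: the statement is the Claim_ definition above) =====
theorem fix_it_spec : Claim_equal_fix_it := by
  intro prev_rules pg_num _
  unfold Spec_fix_it fix_it fix_it_alt
  have hA : (PySem.List.pyRange 0 (PySem.List.len pg_num) 1).foldl (fun ans i =>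
      let current := PySem.List.pyGetD pg_num i 0
      match (PySem.Dict.mk prev_rules).get? current with
      | none => PySem.List.pySetD ans 0 current
      | some rules =>
          let counter : Int :=
            (PySem.List.pyRange 0 (PySem.List.len pg_num) 1).foldl (fun c j =>
              if i = j then c
              else if PySem.List.pyGetD pg_num j 0 ∈ rules then c + 1 else c) 0
          PySem.List.pySetD ans counter current)
      (List.replicate pg_num.length 0)
      = pg_num.foldl (fun ans v => PySem.List.pySetD ans (pvRank prev_rules pg_num v) v)
          (List.replicate pg_num.length 0) := by
    rw [PySem.List.foldl_congr_mem _ _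
      (fun ans i => PySem.List.pySetD ans (pvRank prev_rules pg_num (PySem.List.pyGetD pg_num i 0))
        (PySem.List.pyGetD pg_num i 0)) _ ?_]
    · have h := PySem.List.foldl_pyRange_zero_pyGetD' pg_num 0
        (fun ans v => PySem.List.pySetD ans (pvRank prev_rules pg_num v) v)
        (List.replicate pg_num.length 0)
      simp only [PySem.List.len_eq] at h ⊢
      exact h
    · intro ans i hi
      obtain ⟨hi0, hin⟩ := PySem.List.mem_pyRange_one.mp hi
      simp only [pvRank]
      cases hm : (PySem.Dict.mk prev_rules).get? (PySem.List.pyGetD pg_num i 0) with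
      | none => simp
      | some rules =>
        simp only []
        rw [pvInnerA pg_num rules i hi0 hin]
  rw [hA]
  apply PySem.List.foldl_congr_mem
  intro ans v _
  congr 1
  simp only [pvRank]
  cases hm : (PySem.Dict.mk prev_rules).get? v with
  | none => simp
  | some rules =>
    simp only []
    rw [PySem.List.foldl_add (PySem.Set.ofList rules)
      (fun r => (pg_num.foldl (fun d v => d.insert v (d.getD v 0 + 1)) PySem.Dict.empty).getD r 0) 0]
    have hc : ((PySem.Set.ofList rules).map
        (fun r => (pg_num.foldl (fun d v => d.insert v (d.getD v 0 + 1)) PySem.Dict.empty).getD r 0)).sum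
        = ((PySem.Set.ofList rules).map (fun r => (pg_num.count r : Int))).sum := by
      congr 1
      apply List.map_congr_left
      intro r _
      rw [PySem.Dict.getD_foldl_insert_add_one]
      simp
    rw [hc, pvSumCounts _ (PySem.Set.nodup_ofList rules) pg_num]
    have hcp : pg_num.countP (fun x => decide (x ∈ PySem.Set.ofList rules))
        = pg_num.countP (fun x => decide (x ∈ rules)) := by
      apply List.countP_congr
      intro x _
      simp [PySem.Set.mem_ofList]
    have hct : (PySem.Set.contains (PySem.Set.ofList rules) v = true) ↔ v ∈ rules := by
      simp [PySem.Set.contains, PySem.Set.mem_ofList]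
    rw [hcp]
    by_cases hv : v ∈ rules
    · simp [hv]
    · have hnc : ¬ PySem.Set.contains (PySem.Set.ofList rules) v = true := fun h => hv (hct.mp h)
      simp only [if_neg hnc, if_neg hv]; omega
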